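-- pv_equiv track=rewrite | github.com/pypi-data/pypi-mirror-95 | packages/ssht00ls/ssht00ls-2.8.0.tar.gz/ssht00ls-2.8.0/ssht00ls/classes/ssync/utils.py | serialize_path
-- ===== SOURCE A (Python) =====
-- def serialize_path(path, append_last_slash=False):
-- 	# keep in mind the file is saved by python and then executed.
-- 	list = []
-- 	for i in [" ","!","?","@","#","$","&","(",")","[","]","{","}"]:
-- 		list.append([i, f"\\{i}"],)
-- 	for x,y in list+[
-- 		#[" ", "\\ "],
-- 	]:
-- 		path = path.replace(x,y)
-- 	while True:
-- 		if append_last_slash and len(path) > 0 and path[len(path)-1] == "/": path = path[:-1]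
-- 		else: break
-- 	return path
-- ===== SOURCE B (Python) =====
-- _SPECIALS = frozenset(" !?@#$&()[]{}")
--
-- def serialize_path(path, append_last_slash=False):
-- 	escaped = "".join("\\" + c if c in _SPECIALS else c for c in path)
-- 	return escaped.rstrip("/") if append_last_slash else escaped
-- ===== Notes on version B (the rewrite author's own statement) =====
-- stated objective: simpler
-- what changed: A escapes by 13 sequential whole-string str.replace passes then strips trailing slashes one at a time in a while loop; B builds the escaped string in one character-wise pass over path using a frozenset of specials and removes the trailing slashes with a single rstrip.
import Mathlib
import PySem

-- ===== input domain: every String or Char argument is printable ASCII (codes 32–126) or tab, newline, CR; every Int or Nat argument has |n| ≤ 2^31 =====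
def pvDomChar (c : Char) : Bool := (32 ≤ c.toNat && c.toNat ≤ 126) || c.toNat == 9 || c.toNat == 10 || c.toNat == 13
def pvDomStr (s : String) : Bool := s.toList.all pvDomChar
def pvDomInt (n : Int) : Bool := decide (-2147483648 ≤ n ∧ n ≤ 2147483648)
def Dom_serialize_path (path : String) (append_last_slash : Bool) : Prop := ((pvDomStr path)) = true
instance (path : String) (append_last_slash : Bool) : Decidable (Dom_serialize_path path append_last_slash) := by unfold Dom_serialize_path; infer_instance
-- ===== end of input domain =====

-- B replaces A's 13 sequential str.replace passes with one single pass over the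
-- characters (escape each special char as it is copied) and an rstrip('/');
-- objective: simpler. Return value proved equal on all inputs.

-- ===== PORT A =====
-- the while-loop of A: strip one trailing '/' per iteration while the condition holds
def serialize_path_while (append_last_slash : Bool) (p : List Char) : List Char :=
  if append_last_slash = true ∧ p.length > 0 ∧ PySem.List.pyGet? p ((p.length : Int) - 1) = some '/' then
    serialize_path_while append_last_slash (PySem.List.slice p none (some (-1)))
  else p
termination_by p.length
decreasing_by
  simp [PySem.List.slice_to_neg_one]
  rename_i h
  omega

def serialize_path (path : String) (append_last_slash : Bool) : String :=
  -- list = []; for i in [...]: list.append([i, "\\"+i])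
  let lst : List (String × String) :=
    [" ", "!", "?", "@", "#", "$", "&", "(", ")", "[", "]", "{", "}"].foldl
      (fun acc i => acc ++ [(i, "\\" ++ i)]) []
  -- for x,y in list+[]: path = path.replace(x,y)
  let path := (lst ++ []).foldl (fun p (xy : String × String) => PySem.Str.replace p xy.1 xy.2) path
  -- while True: if ...: path = path[:-1] else: break
  String.ofList (serialize_path_while append_last_slash path.toList)

-- ===== PORT B =====
def serialize_path_specials : PySem.Set Char :=
  PySem.Set.ofList [' ', '!', '?', '@', '#', '$', '&', '(', ')', '[', ']', '{', '}']

def serialize_path_alt (path : String) (append_last_slash : Bool) : String :=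
  let escaped :=
    path.toList.flatMap (fun c => if serialize_path_specials.contains c then ['\\', c] else [c])
  -- rstrip("/"): drop the trailing '/' characters (ported by hand, exact for this char set)
  if append_last_slash then
    String.ofList ((escaped.reverse.dropWhile (fun c => c == '/')).reverse)
  else
    String.ofList escaped

-- ===== PRECONDITION & SPEC =====
def Spec_serialize_path (path : String) (append_last_slash : Bool) (out : String) : Prop := out = serialize_path_alt path append_last_slash
instance (path : String) (append_last_slash : Bool) (out : String) : Decidable (Spec_serialize_path path append_last_slash out) := by unfold Spec_serialize_path; infer_instance

-- ===== CLAIM (what is proved, stated in full; the proofs are below) =====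
def Claim_equal_serialize_path : Prop := ∀ (path : String) (append_last_slash : Bool), Dom_serialize_path path append_last_slash → Spec_serialize_path path append_last_slash (serialize_path path append_last_slash)

-- ===== LEMMAS AND PROOFS =====

-- single-char replace is a character-wise flatMap
theorem replace_single_go (x : Char) (nw : List Char) :
    ∀ (fuel : Nat) (l acc : List Char), l.length ≤ fuel →
      PySem.Chars.replace.go [x] nw fuel l acc =
        acc.reverse ++ l.flatMap (fun c => if c = x then nw else [c]) := by
  intro fuel
  induction fuel with
  | zero =>
    intro l acc h
    have : l = [] := by cases l <;> simp_all
    subst this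
    simp [PySem.Chars.replace.go]
  | succ n ih =>
    intro l acc h
    cases l with
    | nil => simp [PySem.Chars.replace.go]
    | cons c t =>
      simp only [PySem.Chars.replace.go]
      by_cases hc : c = x
      · subst hc
        have hp : List.isPrefixOf [c] (c :: t) = true := by simp [List.isPrefixOf]
        rw [if_pos hp]
        rw [ih _ _ (by simpa using Nat.le_of_succ_le_succ h)]
        simp
      · have hp : List.isPrefixOf [x] (c :: t) = false := by
          simp [List.isPrefixOf]; exact fun hcx => (hc hcx.symm).elim
        rw [if_neg (by simp [hp])]
        rw [ih _ _ (by simpa using Nat.le_of_succ_le_succ h)]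
        simp [hc]

theorem replace_single (x : Char) (nw s : List Char) :
    PySem.Chars.replace s [x] nw = s.flatMap (fun c => if c = x then nw else [c]) := by
  rw [PySem.Chars.replace]
  simp only [List.isEmpty_cons, Bool.false_eq_true, if_false]
  exact replace_single_go x nw s.length s [] le_rfl

-- folding single-char escapes over a duplicate-free list of specials escapes every
-- special in one pass
theorem fold_escapes (L : List Char) (hnd : L.Nodup) (hbs : '\\' ∉ L) :
    ∀ (s : List Char),
      L.foldl (fun p x => PySem.Chars.replace p [x] ['\\', x]) s =
        s.flatMap (fun c => if c ∈ L then ['\\', c] else [c]) := by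
  induction L with
  | nil => intro s; simp
  | cons x rest ih =>
    intro s
    have hx : x ∉ rest := (List.nodup_cons.mp hnd).1
    have hbs' : '\\' ∉ rest := fun h => hbs (List.mem_cons_of_mem _ h)
    simp only [List.foldl_cons]
    rw [ih (List.nodup_cons.mp hnd).2 hbs', replace_single, List.flatMap_assoc]
    congr 1
    funext c
    by_cases hc : c = x
    · subst hc
      simp [hx, hbs', List.flatMap]
    · simp [hc, List.flatMap]

-- the fold over pairs of one-char strings, moved to character lists
theorem str_fold_eq_char_fold (L : List Char) :
    ∀ (s : String),
      (((L.map (fun c => (String.ofList [c], String.ofList ['\\', c]))).foldl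
          (fun p (xy : String × String) => PySem.Str.replace p xy.1 xy.2) s)).toList =
        L.foldl (fun p x => PySem.Chars.replace p [x] ['\\', x]) s.toList := by
  induction L with
  | nil => intro s; simp
  | cons x rest ih =>
    intro s
    simp only [List.map_cons, List.foldl_cons]
    rw [ih]
    congr 1
    simp [PySem.Str.replace, String.toList_ofList]

-- A's concrete pair list is the mapped form of the 13 special characters
theorem lst_eq_map :
    (([" ", "!", "?", "@", "#", "$", "&", "(", ")", "[", "]", "{", "}"].foldl
        (fun acc i => acc ++ [(i, "\\" ++ i)]) ([] : List (String × String))) ++ []) =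
      [' ', '!', '?', '@', '#', '$', '&', '(', ')', '[', ']', '{', '}'].map
        (fun c => (String.ofList [c], String.ofList ['\\', c])) := by
  rfl

-- the escaping predicates of the two ports agree
theorem escape_fun_eq :
    (fun c => if serialize_path_specials.contains c then ['\\', c] else [c]) =
      (fun c => if c ∈ [' ', '!', '?', '@', '#', '$', '&', '(', ')', '[', ']', '{', '}'] then ['\\', c] else [c]) := by
  funext c
  have : serialize_path_specials.contains c =
      decide (c ∈ [' ', '!', '?', '@', '#', '$', '&', '(', ')', '[', ']', '{', '}']) := by
    simp [serialize_path_specials, PySem.Set.ofList]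
  rw [this]
  by_cases h : c ∈ [' ', '!', '?', '@', '#', '$', '&', '(', ')', '[', ']', '{', '}'] <;> simp [h]

-- p[len(p)-1] is the last element
theorem get_last_eq (p : List Char) (hp : 0 < p.length) :
    PySem.List.pyGet? p ((p.length : Int) - 1) = p.getLast? := by
  have h1 : ((p.length : Int) - 1) = ((p.length - 1 : Nat) : Int) := by omega
  rw [h1, PySem.List.pyGet?_natCast, List.getLast?_eq_getElem?]

-- A's while loop strips all trailing slashes, i.e. equals B's reverse/dropWhile/reverse
theorem while_eq_rstrip (p : List Char) :
    serialize_path_while true p = ((p.reverse.dropWhile (fun c => c == '/')).reverse) := by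
  induction hn : p.length using Nat.strong_induction_on generalizing p with
  | _ n ih =>
  rw [serialize_path_while]
  by_cases hl : p.getLast? = some '/'
  · obtain ⟨l', hc⟩ := List.getLast?_eq_some_iff.mp hl
    have hlen : 0 < p.length := by rw [hc]; simp
    rw [if_pos ⟨rfl, hlen, by rw [get_last_eq p hlen, hl]⟩]
    rw [PySem.List.slice_to_neg_one]
    rw [ih p.dropLast.length (by rw [hc] at hn ⊢; simp at hn ⊢; omega) p.dropLast rfl]
    rw [hc]
    simp
  · have hneg : ¬ (true = true ∧ p.length > 0 ∧
        PySem.List.pyGet? p ((p.length : Int) - 1) = some '/') := by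
      rintro ⟨-, hlen, hget⟩
      exact hl (by rw [← get_last_eq p hlen, hget])
    rw [if_neg hneg]
    cases hp : p.getLast? with
    | none =>
      have : p = [] := by simpa using hp
      subst this; simp
    | some c =>
      have hcne : c ≠ '/' := fun h => hl (h ▸ hp)
      obtain ⟨l', hc⟩ := List.getLast?_eq_some_iff.mp hp
      rw [hc]
      simp [hcne]

theorem while_false (p : List Char) : serialize_path_while false p = p := by
  rw [serialize_path_while]; simp

-- ===== VERDICT (by name: the statement is the Claim_ definition above) =====
theorem serialize_path_spec : Claim_equal_serialize_path := by
  intro path append_last_slash _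
  unfold Spec_serialize_path serialize_path serialize_path_alt
  dsimp only
  have hesc :
      ((([" ", "!", "?", "@", "#", "$", "&", "(", ")", "[", "]", "{", "}"].foldl
          (fun acc i => acc ++ [(i, "\\" ++ i)]) ([] : List (String × String))) ++ []).foldl
        (fun p (xy : String × String) => PySem.Str.replace p xy.1 xy.2) path).toList =
      path.toList.flatMap
        (fun c => if serialize_path_specials.contains c then ['\\', c] else [c]) := by
    rw [lst_eq_map, str_fold_eq_char_fold,
      fold_escapes _ (by decide) (by decide), escape_fun_eq]
  cases append_last_slash with
  | false =>
    rw [if_neg (by simp), while_false, hesc]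
  | true =>
    rw [if_pos rfl, while_eq_rstrip, hesc]
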